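-- pv_equiv track=rewrite | github.com/ITBE-Lab/MA | MA/simulate_pacbio.py | calculate_cigar_operations
-- ===== SOURCE A (Python) =====
-- def calculate_cigar_operations(current_readlength, insertions, deletions, substitutions):
--     """
--     Given a read length, and three lists of positions
--     with insertions, deletions, substitutions, respectively,
--     calculate the cigar string for one read.
--     Return list of pairs of (cigar operation codes, count) for pysam.
--     """
--     MATCH, DELETION, INSERTION, SUBST = (7, 2, 1, 8)  # PySam CIGAR Operation Codes
--     cigar = []
--     count = 0
--     last_op = MATCH
--     point_ins = 0
--     point_del = 0
--     point_sub = 0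
--     for i in range(current_readlength):
--         if point_del < len(deletions) and i == deletions[point_del]:
--             # multiple deletions get the same index
--             cigar.append((last_op, count))
--             count = 1
--             last_op = DELETION
--             point_del += 1
--             while point_del < len(deletions) and i == deletions[point_del]:
--                 count += 1
--                 point_del += 1
--
--         if point_ins < len(insertions) and i == insertions[point_ins]:
--             point_ins += 1
--             if last_op == INSERTION:
--                 count += 1
--             else:
--                 cigar.append((last_op, count))
--                 count = 1
--                 last_op = INSERTION
--         elif point_sub < len(substitutions) and i == substitutions[point_sub]:
--             point_sub += 1
--             if last_op == SUBST:
--                 count += 1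
--             else:
--                 cigar.append((last_op, count))
--                 count = 1
--                 last_op = SUBST
--         else:
--             if last_op == MATCH:
--                 count += 1
--             else:
--                 cigar.append((last_op, count))
--                 count = 1
--                 last_op = MATCH
--     cigar.append((last_op, count))
--     if cigar[0][1] == 0:
--         cigar = cigar[1:]
--     return cigar
-- ===== SOURCE B (Python) =====
-- def calculate_cigar_operations(current_readlength, insertions, deletions, substitutions):
--     """Event-skipping rewrite: jump directly between edit positions instead of
--     scanning every base; match runs between events are added in bulk."""
--     MATCH, DELETION, INSERTION, SUBST = (7, 2, 1, 8)
--     n = current_readlength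
--     cigar = []
--     count = 0
--     last_op = MATCH
--     pi = pd = ps = 0
--     i = 0
--     while True:
--         # next position (< n) at which any live pointer can fire
--         nxt = None
--         if pd < len(deletions) and i <= deletions[pd] < n:
--             nxt = deletions[pd]
--         if pi < len(insertions) and i <= insertions[pi] < n:
--             nxt = insertions[pi] if nxt is None else min(nxt, insertions[pi])
--         if ps < len(substitutions) and i <= substitutions[ps] < n:
--             nxt = substitutions[ps] if nxt is None else min(nxt, substitutions[ps])
--         if nxt is None:
--             break
--         j = nxt
--         # bulk match run over the event-free gap [i, j)
--         if j > i:
--             if last_op == MATCH: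
--                 count += j - i
--             else:
--                 cigar.append((last_op, count))
--                 count = j - i
--                 last_op = MATCH
--         # deletion run at j: measure its length, then advance pd in one go
--         if pd < len(deletions) and deletions[pd] == j:
--             q = pd
--             while q < len(deletions) and deletions[q] == j:
--                 q += 1
--             cigar.append((last_op, count))
--             count = q - pd
--             last_op = DELETION
--             pd = q
--         # the base at j itself carries exactly one op
--         if pi < len(insertions) and insertions[pi] == j:
--             op2 = INSERTION
--             pi += 1
--         elif ps < len(substitutions) and substitutions[ps] == j:
--             op2 = SUBST
--             ps += 1
--         else:
--             op2 = MATCH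
--         if last_op == op2:
--             count += 1
--         else:
--             cigar.append((last_op, count))
--             count = 1
--             last_op = op2
--         i = j + 1
--     # trailing matches
--     if n > i:
--         if last_op == MATCH:
--             count += n - i
--         else:
--             cigar.append((last_op, count))
--             count = n - i
--             last_op = MATCH
--     cigar.append((last_op, count))
--     if cigar[0][1] == 0:
--         cigar = cigar[1:]
--     return cigar
-- ===== Notes on version B (the rewrite author's own statement) =====
-- stated objective: alternative
-- what changed: Instead of scanning every base position in range(current_readlength) and re-testing the three pointers at each one, B jumps directly from one edit position to the next (the minimum of the three live pointer values), adding the event-free match run between events in bulk; cost moves from O(current_readlength) to O(number of edits), which is the same on edit-dense inputs.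
import Mathlib
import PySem

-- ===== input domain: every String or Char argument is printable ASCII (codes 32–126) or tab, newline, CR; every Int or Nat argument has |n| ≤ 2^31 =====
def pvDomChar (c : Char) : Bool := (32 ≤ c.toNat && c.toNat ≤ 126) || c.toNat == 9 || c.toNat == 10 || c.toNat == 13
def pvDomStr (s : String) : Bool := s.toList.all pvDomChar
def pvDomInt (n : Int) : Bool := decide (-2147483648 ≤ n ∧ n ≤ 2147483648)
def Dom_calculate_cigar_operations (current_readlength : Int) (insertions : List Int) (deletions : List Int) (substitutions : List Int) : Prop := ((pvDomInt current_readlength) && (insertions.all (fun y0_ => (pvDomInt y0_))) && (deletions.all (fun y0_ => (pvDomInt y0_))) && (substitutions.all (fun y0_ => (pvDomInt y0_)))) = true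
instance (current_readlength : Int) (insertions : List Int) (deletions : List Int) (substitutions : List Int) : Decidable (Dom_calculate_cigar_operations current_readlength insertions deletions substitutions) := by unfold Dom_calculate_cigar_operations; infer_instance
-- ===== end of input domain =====

-- B replaces A's per-base scan over range(current_readlength) by a loop that jumps
-- directly from one edit position to the next, adding the event-free match runs in
-- bulk (an alternative algorithm). Equivalence is proved on all inputs (no Pre_).

-- ===== PORT A =====

-- loop state of both Pythons: cigar list, current run count/op, three pointers
structure CigSt where
  cigar : List (Int × Int)
  count : Int
  lastOp : Int
  pi : Nat
  pd : Nat
  ps : Nat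
deriving Repr, DecidableEq

def cigInit : CigSt := ⟨[], 0, 7, 0, 0, 0⟩

-- A's inner `while point_del < len(deletions) and i == deletions[point_del]`
def delWhile (d : List Int) (i : Int) (count : Int) (pd : Nat) : Int × Nat :=
  if h : pd < d.length ∧ d.getD pd 0 = i then delWhile d i (count + 1) (pd + 1)
  else (count, pd)
termination_by d.length - pd
decreasing_by omega

-- A's loop body for one position i
def stepA (ins d sub : List Int) (s : CigSt) (i : Int) : CigSt :=
  let s :=
    if s.pd < d.length ∧ d.getD s.pd 0 = i then
      let r := delWhile d i 1 (s.pd + 1)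
      { s with cigar := s.cigar ++ [(s.lastOp, s.count)], count := r.1, lastOp := 2, pd := r.2 }
    else s
  if s.pi < ins.length ∧ ins.getD s.pi 0 = i then
    if s.lastOp = 1 then { s with pi := s.pi + 1, count := s.count + 1 }
    else { s with pi := s.pi + 1, cigar := s.cigar ++ [(s.lastOp, s.count)], count := 1, lastOp := 1 }
  else if s.ps < sub.length ∧ sub.getD s.ps 0 = i then
    if s.lastOp = 8 then { s with ps := s.ps + 1, count := s.count + 1 }
    else { s with ps := s.ps + 1, cigar := s.cigar ++ [(s.lastOp, s.count)], count := 1, lastOp := 8 }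
  else
    if s.lastOp = 7 then { s with count := s.count + 1 }
    else { s with cigar := s.cigar ++ [(s.lastOp, s.count)], count := 1, lastOp := 7 }

def calculate_cigar_operations (current_readlength : Int) (insertions : List Int) (deletions : List Int) (substitutions : List Int) : List (Int × Int) :=
  let s := (PySem.List.pyRange 0 current_readlength 1).foldl (stepA insertions deletions substitutions) cigInit
  let cigar := s.cigar ++ [(s.lastOp, s.count)]
  -- cigar is nonempty (just appended); python: `if cigar[0][1] == 0: cigar = cigar[1:]`
  match cigar with
  | (op, c) :: rest => if c = 0 then rest else (op, c) :: rest
  | [] => []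

-- ===== PORT B =====

-- B's run-length scan `while q < len(d) and d[q] == j: q += 1`
def runEnd (d : List Int) (j : Int) (q : Nat) : Nat :=
  if h : q < d.length ∧ d.getD q 0 = j then runEnd d j (q + 1)
  else q
termination_by d.length - q
decreasing_by omega

-- B's `nxt` computation (sequential min over the three live pointers)
def nextEv (n : Int) (ins d sub : List Int) (pi pd ps : Nat) (i : Int) : Option Int :=
  let nxt : Option Int :=
    if pd < d.length ∧ i ≤ d.getD pd 0 ∧ d.getD pd 0 < n then some (d.getD pd 0) else none
  let nxt : Option Int :=
    if pi < ins.length ∧ i ≤ ins.getD pi 0 ∧ ins.getD pi 0 < n then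
      (match nxt with | none => some (ins.getD pi 0) | some v => some (min v (ins.getD pi 0)))
    else nxt
  let nxt : Option Int :=
    if ps < sub.length ∧ i ≤ sub.getD ps 0 ∧ sub.getD ps 0 < n then
      (match nxt with | none => some (sub.getD ps 0) | some v => some (min v (sub.getD ps 0)))
    else nxt
  nxt

-- B's bulk match-run merge (`if m > 0: ...`), used for gaps and the tail
def mergeM (s : CigSt) (m : Int) : CigSt :=
  if 0 < m then
    if s.lastOp = 7 then { s with count := s.count + m }
    else { s with cigar := s.cigar ++ [(s.lastOp, s.count)], count := m, lastOp := 7 }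
  else s

-- B's event handling at position j: deletion run, then the one op carried by base j
def applyEv (ins d sub : List Int) (s : CigSt) (j : Int) : CigSt :=
  let s :=
    if s.pd < d.length ∧ d.getD s.pd 0 = j then
      let q := runEnd d j s.pd
      { s with cigar := s.cigar ++ [(s.lastOp, s.count)],
               count := (q : Int) - (s.pd : Int), lastOp := 2, pd := q }
    else s
  let p :=
    if s.pi < ins.length ∧ ins.getD s.pi 0 = j then ((1 : Int), { s with pi := s.pi + 1 })
    else if s.ps < sub.length ∧ sub.getD s.ps 0 = j then ((8 : Int), { s with ps := s.ps + 1 })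
    else ((7 : Int), s)
  let op2 := p.1
  let s := p.2
  if s.lastOp = op2 then { s with count := s.count + 1 }
  else { s with cigar := s.cigar ++ [(s.lastOp, s.count)], count := 1, lastOp := op2 }

-- B's `while True` loop; the fuel only makes the recursion structural: the loop
-- advances i by at least 1 each iteration and stops once no pointer value lies in
-- [i, n), so n.toNat iterations always suffice (proved in the lemmas below).
def goB (ins d sub : List Int) (n : Int) : Nat → CigSt → Int → CigSt × Int
  | 0, s, i => (s, i)
  | f + 1, s, i =>
    match nextEv n ins d sub s.pi s.pd s.ps i with
    | none => (s, i)
    | some j => goB ins d sub n f (applyEv ins d sub (mergeM s (j - i)) j) (j + 1)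

def calculate_cigar_operations_alt (current_readlength : Int) (insertions : List Int) (deletions : List Int) (substitutions : List Int) : List (Int × Int) :=
  let r := goB insertions deletions substitutions current_readlength current_readlength.toNat cigInit 0
  let s := mergeM r.1 (current_readlength - r.2)
  let cigar := s.cigar ++ [(s.lastOp, s.count)]
  match cigar with
  | (op, c) :: rest => if c = 0 then rest else (op, c) :: rest
  | [] => []

-- ===== PRECONDITION & SPEC =====
def Spec_calculate_cigar_operations (current_readlength : Int) (insertions : List Int) (deletions : List Int) (substitutions : List Int) (out : List (Int × Int)) : Prop := out = calculate_cigar_operations_alt current_readlength insertions deletions substitutions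
instance (current_readlength : Int) (insertions : List Int) (deletions : List Int) (substitutions : List Int) (out : List (Int × Int)) : Decidable (Spec_calculate_cigar_operations current_readlength insertions deletions substitutions out) := by unfold Spec_calculate_cigar_operations; infer_instance

-- ===== CLAIM (what is proved, stated in full; the proofs are below) =====
def Claim_equal_calculate_cigar_operations : Prop := ∀ (current_readlength : Int) (insertions : List Int) (deletions : List Int) (substitutions : List Int), Dom_calculate_cigar_operations current_readlength insertions deletions substitutions → Spec_calculate_cigar_operations current_readlength insertions deletions substitutions (calculate_cigar_operations current_readlength insertions deletions substitutions)

-- ===== LEMMAS AND PROOFS =====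

-- a pointer "fires" in A's body at position t
def fireAt (xs : List Int) (p : Nat) (t : Int) : Prop := p < xs.length ∧ xs.getD p 0 = t

theorem mergeM_pi (s : CigSt) (m : Int) : (mergeM s m).pi = s.pi := by
  unfold mergeM; split_ifs <;> rfl

theorem mergeM_pd (s : CigSt) (m : Int) : (mergeM s m).pd = s.pd := by
  unfold mergeM; split_ifs <;> rfl

theorem mergeM_ps (s : CigSt) (m : Int) : (mergeM s m).ps = s.ps := by
  unfold mergeM; split_ifs <;> rfl

theorem mergeM_zero (s : CigSt) (m : Int) (h : m ≤ 0) : mergeM s m = s := by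
  unfold mergeM; rw [if_neg (by omega)]

theorem mergeM_add (s : CigSt) (a b : Int) (ha : 0 ≤ a) (hb : 0 ≤ b) :
    mergeM (mergeM s a) b = mergeM s (a + b) := by
  cases s
  unfold mergeM
  split_ifs <;> simp_all [CigSt.mk.injEq] <;> omega

theorem delWhile_runEnd (d : List Int) (i : Int) (count : Int) (pd : Nat) :
    delWhile d i count pd = (count + ((runEnd d i pd : Int) - (pd : Int)), runEnd d i pd) := by
  induction count, pd using delWhile.induct d i with
  | case1 count pd h ih =>
    rw [delWhile, dif_pos h, runEnd, dif_pos h, ih]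
    simp only [Prod.mk.injEq, and_true]
    push_cast
    ring
  | case2 count pd h =>
    rw [delWhile, dif_neg h, runEnd, dif_neg h]
    simp

theorem runEnd_unfold_pos (d : List Int) (j : Int) (q : Nat) (h : q < d.length ∧ d.getD q 0 = j) :
    runEnd d j q = runEnd d j (q + 1) := by
  conv_lhs => rw [runEnd]
  rw [dif_pos h]

theorem stepA_eq_applyEv (ins d sub : List Int) (s : CigSt) (j : Int) :
    stepA ins d sub s j = applyEv ins d sub s j := by
  obtain ⟨cg, c, lo, pi, pd, ps⟩ := s
  dsimp only [stepA, applyEv]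
  rw [delWhile_runEnd]
  by_cases hd : pd < d.length ∧ d.getD pd 0 = j
  · rw [runEnd_unfold_pos d j pd hd]
    simp only [hd]
    split_ifs <;> simp_all [CigSt.mk.injEq] <;> omega
  · simp only [hd, if_false]
    split_ifs <;> rfl
theorem stepA_noFire (ins d sub : List Int) (s : CigSt) (t : Int)
    (h1 : ¬ fireAt d s.pd t) (h2 : ¬ fireAt ins s.pi t) (h3 : ¬ fireAt sub s.ps t) :
    stepA ins d sub s t = mergeM s 1 := by
  unfold stepA mergeM fireAt at *
  rw [if_neg h1, if_neg h2, if_neg h3, if_pos (by omega : (0:Int) < 1)]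

-- no pointer fires at position t (A's body does a plain match step there)
def quiet (ins d sub : List Int) (s : CigSt) (t : Int) : Prop :=
  ¬ fireAt d s.pd t ∧ ¬ fireAt ins s.pi t ∧ ¬ fireAt sub s.ps t

theorem nextEv_none_quiet (n : Int) (ins d sub : List Int) (s : CigSt) (i : Int)
    (h : nextEv n ins d sub s.pi s.pd s.ps i = none) :
    ∀ t, i ≤ t → t < n → quiet ins d sub s t := by
  intro t ht1 ht2
  unfold nextEv at h
  split_ifs at h
  simp only [quiet, fireAt, List.getD_eq_getElem?_getD] at *
  omega

theorem nextEv_some_facts (n : Int) (ins d sub : List Int) (s : CigSt) (i j : Int)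
    (h : nextEv n ins d sub s.pi s.pd s.ps i = some j) :
    i ≤ j ∧ j < n ∧ ∀ t, i ≤ t → t < j → quiet ins d sub s t := by
  unfold nextEv at h
  split_ifs at h <;> simp at h <;>
    (simp only [quiet, fireAt, List.getD_eq_getElem?_getD] at *
     refine ⟨by omega, by omega, ?_⟩
     intro t ht1 ht2
     omega)
theorem quiet_mergeM (ins d sub : List Int) (s : CigSt) (m t : Int) :
    quiet ins d sub (mergeM s m) t ↔ quiet ins d sub s t := by
  simp [quiet, fireAt, mergeM_pi, mergeM_pd, mergeM_ps]

theorem gapRun (ins d sub : List Int) (k : Nat) :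
    ∀ (s : CigSt) (i : Int), (∀ t, i ≤ t → t < i + (k : Int) → quiet ins d sub s t) →
      (PySem.List.pyRange i (i + (k : Int)) 1).foldl (stepA ins d sub) s = mergeM s (k : Int) := by
  induction k with
  | zero =>
    intro s i h
    rw [PySem.List.pyRange_one_eq_nil (by omega)]
    simp [mergeM_zero s 0 (by omega)]
  | succ k ih =>
    intro s i h
    rw [PySem.List.pyRange_one_cons (by push_cast; omega), List.foldl_cons]
    obtain ⟨q1, q2, q3⟩ := h i (le_refl i) (by push_cast; omega)
    rw [stepA_noFire ins d sub s i q1 q2 q3]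
    rw [show i + ((k + 1 : Nat) : Int) = (i + 1) + (k : Int) by push_cast; ring]
    rw [ih (mergeM s 1) (i + 1) (by
      intro t ht1 ht2
      rw [quiet_mergeM]
      exact h t (by omega) (by push_cast; omega))]
    rw [mergeM_add s 1 k (by omega) (by omega)]
    congr 1
    push_cast
    ring

theorem gapRun' (ins d sub : List Int) (s : CigSt) (i j : Int) (hij : i ≤ j)
    (h : ∀ t, i ≤ t → t < j → quiet ins d sub s t) :
    (PySem.List.pyRange i j 1).foldl (stepA ins d sub) s = mergeM s (j - i) := by
  have e : i + (((j - i).toNat : Nat) : Int) = j := by omega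
  have hg := gapRun ins d sub (j - i).toNat s i (by intro t ht1 ht2; exact h t ht1 (by omega))
  rw [e] at hg
  rw [hg]
  congr 1
  omega

theorem mainAux (ins d sub : List Int) (n : Int) (f : Nat) :
    ∀ (s : CigSt) (i : Int), 0 ≤ i → (n - i).toNat ≤ f →
      (PySem.List.pyRange i n 1).foldl (stepA ins d sub) s
        = mergeM (goB ins d sub n f s i).1 (n - (goB ins d sub n f s i).2) := by
  induction f with
  | zero =>
    intro s i h0 hf
    rw [PySem.List.pyRange_one_eq_nil (by omega)]
    simp [goB, mergeM_zero _ _ (by omega : n - i ≤ 0)]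
  | succ f ih =>
    intro s i h0 hf
    rcases hne : nextEv n ins d sub s.pi s.pd s.ps i with _ | j
    · simp only [goB, hne]
      by_cases hin : i ≤ n
      · exact gapRun' ins d sub s i n hin (nextEv_none_quiet n ins d sub s i hne)
      · rw [PySem.List.pyRange_one_eq_nil (by omega), mergeM_zero _ _ (by omega)]
        simp
    · simp only [goB, hne]
      obtain ⟨hij, hjn, hq⟩ := nextEv_some_facts n ins d sub s i j hne
      rw [PySem.List.pyRange_one_append i j n hij (by omega), List.foldl_append,
          PySem.List.pyRange_one_cons hjn, List.foldl_cons,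
          gapRun' ins d sub s i j hij hq, stepA_eq_applyEv]
      exact ih (applyEv ins d sub (mergeM s (j - i)) j) (j + 1) (by omega) (by omega)

-- ===== VERDICT (by name: the statement is the Claim_ definition above) =====
theorem calculate_cigar_operations_spec : Claim_equal_calculate_cigar_operations := by
  intro n ins d sub _
  unfold Spec_calculate_cigar_operations calculate_cigar_operations calculate_cigar_operations_alt
  rw [mainAux ins d sub n n.toNat cigInit 0 (by omega) (by omega)]
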